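-- pv_equiv track=rewrite | github.com/WangYunchao2023/knowledge-base-manager | skills/opendataloader-pdf/opendataloader_auto.py | _detect_merged_cells_from_flat
-- ===== SOURCE A (Python) =====
-- def _detect_merged_cells_from_flat(table_data: list) -> tuple:
--     """
--     从 opendataloader 输出的扁平 table_data 推算是否存在合并单元格。
--     table_data: 扁平 2D 数组 [[cell, ...], ...]
--     返回: (flat_array, has_merged_cells: bool)
--
--     推算逻辑:
--     - 如果某行 cell 数 < 最大列数 → 存在横向合并(colspan)
--     - 如果相邻两行某列内容完全相同且其间无空行 → 可能纵向合并(row_span)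
--     缺点:无法精确还原 colspan/row_span 值,只能标记"疑似合并"
--     """
--     if not table_data or not isinstance(table_data, list):
--         return table_data, False
--
--     # 估算总列数(最多 cell 的那一行)
--     max_cols = max(len(row) for row in table_data if isinstance(row, list))
--     if max_cols == 0:
--         return table_data, False
--
--     has_merged = False
--     for row in table_data:
--         if not isinstance(row, list):
--             continue
--         cell_count = len([c for c in row if c is not None and str(c).strip() != ""])
--         if len(row) < max_cols:
--             has_merged = True
--             break
--
--     return table_data, has_merged
-- ===== SOURCE B (Python) =====
-- def _detect_merged_cells_from_flat(table_data: list) -> tuple: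
--     if not table_data or not isinstance(table_data, list):
--         return table_data, False
--     # A table has suspected merged cells exactly when its rows do not all share
--     # one width: collect the DISTINCT row widths as a set and test its size.
--     widths = {len(row) for row in table_data if isinstance(row, list)}
--     return table_data, len(widths) > 1
-- ===== Notes on version B (the rewrite author's own statement) =====
-- stated objective: alternative
-- what changed: B builds the SET of distinct row widths and answers len(widths) > 1, replacing A's two staged passes (a max reduction, then a scan-with-break comparing each row length to the max, which also runs a dead per-cell strip/filter pass on every visited row) and its max_cols == 0 special case.
import Mathlib
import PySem

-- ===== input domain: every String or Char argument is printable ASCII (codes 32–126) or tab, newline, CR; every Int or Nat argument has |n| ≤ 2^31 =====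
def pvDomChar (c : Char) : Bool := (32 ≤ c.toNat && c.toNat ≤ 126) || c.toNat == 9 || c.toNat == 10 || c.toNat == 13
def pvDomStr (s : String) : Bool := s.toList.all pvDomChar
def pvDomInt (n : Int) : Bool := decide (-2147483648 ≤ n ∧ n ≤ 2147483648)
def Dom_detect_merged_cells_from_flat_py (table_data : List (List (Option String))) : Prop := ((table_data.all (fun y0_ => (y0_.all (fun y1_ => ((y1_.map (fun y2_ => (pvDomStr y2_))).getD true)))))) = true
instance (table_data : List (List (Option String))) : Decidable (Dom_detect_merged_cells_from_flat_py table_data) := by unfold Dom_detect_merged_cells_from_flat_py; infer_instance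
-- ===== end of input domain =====

-- B replaces A's max-then-scan-with-break (with its unused per-cell strip pass and the
-- max_cols == 0 special case) by one set of distinct row widths: merged ⇔ more than one width.
-- Objective: alternative (different mechanism, same cost class). Under the type convention
-- every row is a list, so A's isinstance checks are vacuous and A is total.

-- ===== PORT A =====
-- A's loop: for row in table_data: compute cell_count (unused), break with True
-- on the first row shorter than max_cols.
def pvLoopA (rows : List (List (Option String))) (max_cols : Nat) : Bool :=
  match rows with
  | [] => false
  | row :: rest =>
    -- cell_count is computed by A and never used; kept for faithfulness
    let _cell_count := (row.filter (fun c =>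
      match c with
      | none => false
      | some s => decide (PySem.Str.strip s ≠ ""))).length
    if row.length < max_cols then true else pvLoopA rest max_cols

def detect_merged_cells_from_flat_py (table_data : List (List (Option String))) : List (List (Option String)) × Bool :=
  if table_data = [] then (table_data, false)
  else
    -- max(len(row) for row in table_data): max over the (nonempty) lengths; foldl max 0 is exact on Nats
    let max_cols := (table_data.map List.length).foldl Nat.max 0
    if max_cols = 0 then (table_data, false)
    else (table_data, pvLoopA table_data max_cols)

-- ===== PORT B =====
def detect_merged_cells_from_flat_py_alt (table_data : List (List (Option String))) : List (List (Option String)) × Bool :=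
  if table_data = [] then (table_data, false)
  else
    -- widths = {len(row) for row in table_data}
    let widths : PySem.Set Nat := PySem.Set.ofList (table_data.map List.length)
    (table_data, decide (1 < PySem.Set.len widths))

-- ===== PRECONDITION & SPEC =====
def Spec_detect_merged_cells_from_flat_py (table_data : List (List (Option String))) (out : List (List (Option String)) × Bool) : Prop := out = detect_merged_cells_from_flat_py_alt table_data
instance (table_data : List (List (Option String))) (out : List (List (Option String)) × Bool) : Decidable (Spec_detect_merged_cells_from_flat_py table_data out) := by unfold Spec_detect_merged_cells_from_flat_py; infer_instance

-- ===== CLAIM (what is proved, stated in full; the proofs are below) =====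
def Claim_equal_detect_merged_cells_from_flat_py : Prop := ∀ (table_data : List (List (Option String))), Dom_detect_merged_cells_from_flat_py table_data → Spec_detect_merged_cells_from_flat_py table_data (detect_merged_cells_from_flat_py table_data)

-- ===== LEMMAS AND PROOFS =====

-- A's loop returns true iff some row is shorter than max_cols
theorem pvLoopA_eq_any (rows : List (List (Option String))) (mx : Nat) :
    pvLoopA rows mx = rows.any (fun r => decide (r.length < mx)) := by
  induction rows with
  | nil => rfl
  | cons row rest ih =>
    simp only [pvLoopA, List.any_cons, ih]
    by_cases h : row.length < mx <;> simp [h]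

-- foldl-max: seed bound, element bound, membership (nonempty Nat list)
theorem seed_le_foldl_max (l : List Nat) (s : Nat) : s ≤ l.foldl Nat.max s := by
  induction l generalizing s with
  | nil => simp
  | cons a t ih => exact le_trans (Nat.le_max_left s a) (ih (Nat.max s a))

theorem le_foldl_max (l : List Nat) (s : Nat) : ∀ x ∈ l, x ≤ l.foldl Nat.max s := by
  induction l generalizing s with
  | nil => simp
  | cons a t ih =>
    intro x hx
    rcases List.mem_cons.1 hx with rfl | hx
    · simp only [List.foldl_cons]
      exact le_trans (Nat.le_max_right s x) (seed_le_foldl_max t _)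
    · simp only [List.foldl_cons]
      exact ih (Nat.max s a) x hx

theorem foldl_max_mem (l : List Nat) (s : Nat) (h : l ≠ []) :
    l.foldl Nat.max s = s ∨ l.foldl Nat.max s ∈ l := by
  induction l generalizing s with
  | nil => exact absurd rfl h
  | cons a t ih =>
    simp only [List.foldl_cons]
    by_cases ht : t = []
    · subst ht
      simp only [List.foldl_nil]
      rcases le_total s a with hsa | has
      · right; simp [Nat.max_eq_right hsa]
      · left; exact Nat.max_eq_left has
    · rcases ih (Nat.max s a) ht with heq | hmem
      · rcases le_total s a with hsa | has
        · right; rw [heq]; simp [Nat.max_eq_right hsa]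
        · left; rw [heq]; exact Nat.max_eq_left has
      · right; exact List.mem_cons_of_mem _ hmem

-- distinct-set size exceeds 1 iff the list has two different elements
theorem one_lt_len_ofList_iff (l : List Nat) :
    (1 < PySem.Set.len (PySem.Set.ofList l)) ↔ ∃ a ∈ l, ∃ b ∈ l, a ≠ b := by
  constructor
  · intro h
    have hnd := PySem.Set.nodup_ofList (xs := l)
    set s := PySem.Set.ofList l with hs
    match s, hnd, h with
    | a :: b :: t, hnd, _ =>
      have hab : a ≠ b := by
        intro e; subst e; simp at hnd
      have ha : a ∈ l := (PySem.Set.mem_ofList l a).1 (by rw [← hs]; simp)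
      have hb : b ∈ l := (PySem.Set.mem_ofList l b).1 (by rw [← hs]; simp)
      exact ⟨a, ha, b, hb, hab⟩
  · rintro ⟨a, ha, b, hb, hab⟩
    have ha' : a ∈ PySem.Set.ofList l := (PySem.Set.mem_ofList l a).2 ha
    have hb' : b ∈ PySem.Set.ofList l := (PySem.Set.mem_ofList l b).2 hb
    by_contra hle
    have hle1 : (PySem.Set.ofList l).length ≤ 1 := by
      unfold PySem.Set.len at hle; omega
    match hs : PySem.Set.ofList l, hle1 with
    | [], _ => rw [hs] at ha'; simp at ha'
    | [x], _ =>
      rw [hs] at ha' hb'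
      simp at ha' hb'
      exact hab (ha'.trans hb'.symm)

-- A's answer on a nonempty table equals "two different row widths exist"
theorem a_side_char (td : List (List (Option String))) (h : td ≠ []) :
    (if (td.map List.length).foldl Nat.max 0 = 0 then false
     else pvLoopA td ((td.map List.length).foldl Nat.max 0))
    = decide (∃ a ∈ td.map List.length, ∃ b ∈ td.map List.length, a ≠ b) := by
  set l := td.map List.length with hl
  have hlne : l ≠ [] := by simp [hl, h]
  set mx := l.foldl Nat.max 0 with hmx
  have hmem : mx ∈ l := by
    rcases foldl_max_mem l 0 hlne with h0 | hm
    · obtain ⟨x, t, he'⟩ := List.exists_cons_of_ne_nil hlne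
      have hx : x ≤ mx := by rw [hmx]; exact le_foldl_max l 0 x (by rw [he']; simp)
      have hmx0 : mx = 0 := by rw [hmx]; exact h0
      have hx0 : x = 0 := by omega
      rw [hmx0, he', ← hx0]
      exact List.mem_cons_self
    · exact hm
  have hub : ∀ x ∈ l, x ≤ mx := le_foldl_max l 0
  by_cases h0 : mx = 0
  · simp only [h0, if_true]
    have hall : ∀ x ∈ l, x = 0 := fun x hx => Nat.le_zero.1 (h0 ▸ hub x hx)
    have : ¬ ∃ a ∈ l, ∃ b ∈ l, a ≠ b := by
      rintro ⟨a, ha, b, hb, hab⟩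
      exact hab ((hall a ha).trans (hall b hb).symm)
    simp [this]
  · simp only [h0, if_false]
    rw [pvLoopA_eq_any, Bool.eq_iff_iff]
    simp only [List.any_eq_true, decide_eq_true_eq]
    constructor
    · rintro ⟨r, hr, hlt⟩
      exact ⟨r.length, List.mem_map.2 ⟨r, hr, rfl⟩, mx, hmem, Nat.ne_of_lt hlt⟩
    · rintro ⟨a, ha, b, hb, hab⟩
      rcases Nat.lt_or_ge a b with hab' | hab'
      · obtain ⟨r, hr, hrl⟩ := List.mem_map.1 ha
        exact ⟨r, hr, by rw [hrl]; exact lt_of_lt_of_le hab' (hub b hb)⟩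
      · have hba : b < a := lt_of_le_of_ne hab' (Ne.symm hab)
        obtain ⟨r, hr, hrl⟩ := List.mem_map.1 hb
        exact ⟨r, hr, by rw [hrl]; exact lt_of_lt_of_le hba (hub a ha)⟩

-- ===== VERDICT (by name: the statement is the Claim_ definition above) =====
theorem detect_merged_cells_from_flat_py_spec : Claim_equal_detect_merged_cells_from_flat_py := by
  intro table_data _
  show detect_merged_cells_from_flat_py table_data = detect_merged_cells_from_flat_py_alt table_data
  unfold detect_merged_cells_from_flat_py detect_merged_cells_from_flat_py_alt
  by_cases he : table_data = []
  · simp [he]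
  · simp only [he, if_false]
    have hA := a_side_char table_data he
    have hB : decide (1 < PySem.Set.len (PySem.Set.ofList (table_data.map List.length)))
        = decide (∃ a ∈ table_data.map List.length, ∃ b ∈ table_data.map List.length, a ≠ b) := by
      rw [decide_eq_decide]; exact one_lt_len_ofList_iff _
    split_ifs with hz
    · rw [if_pos hz] at hA
      exact Prod.ext rfl (by rw [hB]; exact hA)
    · rw [if_neg hz] at hA
      exact Prod.ext rfl (by rw [hB]; exact hA)
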